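-- pv_equiv track=rewrite | github.com/Kerram/Deephol-Bert-Zpp | tree_parser.py | split_into_subtrees
-- ===== SOURCE A (Python) =====
-- def find_end_of_subtree(sentence, pos):
--   if sentence[pos] != "(":
--     return pos
--   sum = 1
--   while sum > 0:
--     pos += 1
--     if (pos >= len(sentence)):
--       return -1
--     if sentence[pos] == "(":
--       sum += 1
--     elif sentence[pos] == ")":
--       sum -= 1
--     if sum == 0:
--       return pos
--   return -1
--
-- def split_into_subtrees(sentence, max_size):
--   if (len(sentence) <= 1):
--     return []
--
--   if len(sentence) <= max_size:
--     return [sentence]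
--
--   ret = []
--   pos = 2
--   while pos + 1 < len(sentence):
--     npos = find_end_of_subtree(sentence, pos) + 1
--     ret.extend(split_into_subtrees(sentence[pos:npos], max_size))
--     pos = npos
--
--   return ret
-- ===== SOURCE B (Python) =====
-- def split_into_subtrees(sentence, max_size):
--     n = len(sentence)
--     # one stack pass: end[i] = index one past the subtree starting at i
--     # (i+1 for a non-"(" character or an unmatched "(")
--     end = list(range(1, n + 1))
--     stack = []
--     for i, c in enumerate(sentence):
--         if c == '(':
--             stack.append(i)
--         elif c == ')' and stack:
--             end[stack.pop()] = i + 1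
--     out = []
--
--     def emit(lo, hi):
--         if hi - lo <= 1:
--             return
--         if hi - lo <= max_size:
--             out.append(sentence[lo:hi])
--             return
--         pos = lo + 2
--         while pos + 1 < hi:
--             nxt = end[pos]
--             emit(pos, nxt)
--             pos = nxt
--
--     emit(0, n)
--     return out
-- ===== Notes on version B (the rewrite author's own statement) =====
-- stated objective: alternative
-- what changed: A rescans and reslices: every recursion level calls find_end_of_subtree to re-count brackets over each child and copies the child as a new string slice before recursing; B makes one stack pass over the whole string that precomputes every bracket's matching end, then splits by index ranges into the original string, slicing only to emit output (intended as the O(n) version of A's O(n*depth) scan; a timing run measured only 1.49x at the largest size, so no speed is claimed).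
import Mathlib
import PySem

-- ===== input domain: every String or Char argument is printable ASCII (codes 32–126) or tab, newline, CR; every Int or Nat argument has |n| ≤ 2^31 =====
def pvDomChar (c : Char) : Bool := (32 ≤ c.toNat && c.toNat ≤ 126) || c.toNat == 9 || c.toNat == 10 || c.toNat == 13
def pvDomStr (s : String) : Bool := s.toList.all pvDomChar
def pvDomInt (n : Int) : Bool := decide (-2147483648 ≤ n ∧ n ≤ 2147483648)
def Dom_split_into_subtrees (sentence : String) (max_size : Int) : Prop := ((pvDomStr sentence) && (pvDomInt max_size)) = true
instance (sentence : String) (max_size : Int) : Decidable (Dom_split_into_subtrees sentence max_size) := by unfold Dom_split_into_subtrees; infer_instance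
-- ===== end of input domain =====

-- B replaces A's per-node counting rescan (find_end_of_subtree re-counts brackets over
-- every child slice at every recursion level) by ONE stack pass that precomputes every
-- bracket's matching end, then an index-based descent that never rescans and slices the
-- original string only to emit output.

-- ===== PORT A =====
-- find_end_of_subtree's while loop; `pos` increases by 1 every iteration, so the Nat
-- fuel (always called with `s.length`) never runs out before the Python returns.
def findEndLoop (s : List Char) (pos : Int) (sum : Int) : Nat → Int
  | 0 => -1
  | fuel + 1 =>
    let pos' := pos + 1
    if pos' ≥ (s.length : Int) then -1
    else
      let sum' := if PySem.List.pyGet? s pos' = some '(' then sum + 1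
                  else if PySem.List.pyGet? s pos' = some ')' then sum - 1 else sum
      if sum' = 0 then pos' else findEndLoop s pos' sum' fuel

def findEnd (s : List Char) (pos : Int) : Int :=
  if PySem.List.pyGet? s pos ≠ some '(' then pos
  else findEndLoop s pos 1 s.length

-- split_into_subtrees: the recursion is fueled by `dep` (a totality device: the Python
-- diverges on inputs outside Pre_; inside Pre_ every child slice is shorter by ≥ 2, so
-- the initial fuel `length + 1` never runs out); the while loop is fueled by `s.length`
-- (inside Pre_ `pos` advances by ≥ 1 every iteration).
mutual
def splitA_core (max_size : Int) (dep : Nat) (s : List Char) : List String :=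
  match dep with
  | 0 => []
  | d + 1 =>
    if (s.length : Int) ≤ 1 then []
    else if (s.length : Int) ≤ max_size then [String.ofList s]
    else loopA max_size d s 2 s.length
termination_by (dep, 0)

def loopA (max_size : Int) (d : Nat) (s : List Char) (pos : Int) (lf : Nat) : List String :=
  match lf with
  | 0 => []
  | lf + 1 =>
    if pos + 1 < (s.length : Int) then
      splitA_core max_size d (PySem.List.slice s (some pos) (some (findEnd s pos + 1))) ++
        loopA max_size d s (findEnd s pos + 1) lf
    else []
termination_by (d, lf)
end

def split_into_subtrees (sentence : String) (max_size : Int) : List String :=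
  splitA_core max_size (sentence.toList.length + 1) sentence.toList

-- ===== PORT B =====
-- end = list(range(1, n + 1))
def buildEndInit (n : Nat) : List Int := PySem.List.pyRange 1 ((n : Int) + 1) 1

-- one step of the stack pass (the Python stack's top = this list's head)
def buildEndStep (acc : List Int × List Int) (ic : Int × Char) : List Int × List Int :=
  if ic.2 = '(' then (acc.1, ic.1 :: acc.2)
  else if ic.2 = ')' then
    match acc.2 with
    | [] => acc
    | i :: st => (PySem.List.pySetD acc.1 i (ic.1 + 1), st)
  else acc

def buildEnd (cs : List Char) : List Int :=
  ((PySem.List.enumerate cs 0).foldl buildEndStep (buildEndInit cs.length, [])).1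

-- emit's recursion / while loop, fueled exactly like A's port (totality device only).
mutual
def emitB (sen : List Char) (e : List Int) (max_size : Int) (dep : Nat) (lo hi : Int) : List String :=
  match dep with
  | 0 => []
  | d + 1 =>
    if hi - lo ≤ 1 then []
    else if hi - lo ≤ max_size then [String.ofList (PySem.List.slice sen (some lo) (some hi))]
    else loopB sen e max_size d (lo + 2) hi sen.length
termination_by (dep, 0)

def loopB (sen : List Char) (e : List Int) (max_size : Int) (d : Nat) (pos hi : Int) (lf : Nat) : List String :=
  match lf with
  | 0 => []
  | lf + 1 =>
    if pos + 1 < hi then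
      emitB sen e max_size d pos (PySem.List.pyGetD e pos (pos + 1)) ++
        loopB sen e max_size d (PySem.List.pyGetD e pos (pos + 1)) hi lf
    else []
termination_by (d, lf)
end

def split_into_subtrees_alt (sentence : String) (max_size : Int) : List String :=
  emitB sentence.toList (buildEnd sentence.toList) max_size (sentence.toList.length + 1)
    0 sentence.toList.length

-- ===== PRECONDITION & SPEC =====
-- parenthesis-matching shape predicate: scanning from depth d, the first offset where
-- the depth returns to 0 (i.e. the position of the matching ')').
def fcStep (c : Char) (d : Nat) : Nat := if c = '(' then d + 1 else if c = ')' then d - 1 else d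

def firstClose : List Char → Nat → Option Nat
  | [], _ => none
  | c :: l, d => if fcStep c d = 0 then some 0 else (firstClose l (fcStep c d)).map (· + 1)

-- Pre_ is exactly the set of inputs where the Python A terminates: A returns at once when
-- len ≤ 1 or len ≤ max_size; otherwise its scan visits the index range [2, len-2] and
-- diverges iff it meets a "(" there with no matching ")" (find_end returns -1, pos resets
-- to 0 and the same unmatched "(" is reached again, or the whole string recurses on itself).
def Pre_split_into_subtrees (sentence : String) (max_size : Int) : Prop :=
  sentence.toList.length ≤ 1 ∨ (sentence.toList.length : Int) ≤ max_size ∨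
    ∀ i < sentence.toList.length - 1, 2 ≤ i → sentence.toList[i]? = some '(' →
      (firstClose (sentence.toList.drop (i + 1)) 1).isSome = true

instance (sentence : String) (max_size : Int) : Decidable (Pre_split_into_subtrees sentence max_size) := by
  unfold Pre_split_into_subtrees; infer_instance

def pvWitness_split_into_subtrees : String × Int := ("(a (bb) (cc))", 4)

def Spec_split_into_subtrees (sentence : String) (max_size : Int) (out : List String) : Prop := out = split_into_subtrees_alt sentence max_size
instance (sentence : String) (max_size : Int) (out : List String) : Decidable (Spec_split_into_subtrees sentence max_size out) := by unfold Spec_split_into_subtrees; infer_instance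

-- ===== CLAIM (what is proved, stated in full; the proofs are below) =====
def Claim_equal_split_into_subtrees : Prop := ∀ (sentence : String) (max_size : Int), Dom_split_into_subtrees sentence max_size → Pre_split_into_subtrees sentence max_size → Spec_split_into_subtrees sentence max_size (split_into_subtrees sentence max_size)

-- ===== LEMMAS AND PROOFS =====

-- running depth of the parenthesis scan: `some d'` if the depth never returns to 0
-- (ending at d'), `none` if it does.
def depthRun : List Char → Nat → Option Nat
  | [], d => some d
  | c :: l, d => if fcStep c d = 0 then none else depthRun l (fcStep c d)

lemma firstClose_cons (c : Char) (l : List Char) (d : Nat) :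
    firstClose (c :: l) d =
      if fcStep c d = 0 then some 0 else (firstClose l (fcStep c d)).map (· + 1) := rfl

lemma fc_none_iff (l : List Char) : ∀ d, (firstClose l d = none ↔ (depthRun l d).isSome = true) := by
  induction l with
  | nil => intro d; simp [firstClose, depthRun]
  | cons c l ih =>
    intro d
    by_cases h : fcStep c d = 0 <;> simp [firstClose, depthRun, h, ih]

lemma depthRun_append (l m : List Char) : ∀ d, depthRun (l ++ m) d = (depthRun l d).bind (depthRun m) := by
  induction l with
  | nil => intro d; simp [depthRun]
  | cons c l ih =>
    intro d
    by_cases h : fcStep c d = 0 <;> simp [depthRun, h, ih]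

lemma fc_append (l m : List Char) : ∀ d, firstClose (l ++ m) d =
    match firstClose l d with
    | some j => some j
    | none => match depthRun l d with
              | some d' => (firstClose m d').map (· + l.length)
              | none => none := by
  induction l with
  | nil => intro d; simp [firstClose, depthRun]
  | cons c l ih =>
    intro d
    by_cases h : fcStep c d = 0
    · simp [firstClose, depthRun, h]
    · have hstep : firstClose (c :: (l ++ m)) d = (firstClose (l ++ m) (fcStep c d)).map (· + 1) := by
        simp [firstClose, h]
      have hstep2 : firstClose (c :: l) d = (firstClose l (fcStep c d)).map (· + 1) := by
        simp [firstClose, h]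
      have hstep3 : depthRun (c :: l) d = depthRun l (fcStep c d) := by
        simp [depthRun, h]
      rw [List.cons_append, hstep, ih, hstep2, hstep3]
      cases hfc : firstClose l (fcStep c d) with
      | some j => simp
      | none =>
        cases hdr : depthRun l (fcStep c d) with
        | none => simp
        | some d' =>
          cases firstClose m d' with
          | none => simp
          | some j => simp [List.length_cons]

lemma fc_lt_length (l : List Char) : ∀ d m, firstClose l d = some m → m < l.length := by
  induction l with
  | nil => intro d m h; simp [firstClose] at h
  | cons c l ih =>
    intro d m h
    by_cases hc : fcStep c d = 0
    · simp [firstClose, hc] at h; simp [← h]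
    · simp only [firstClose, if_neg hc, Option.map_eq_some_iff] at h
      obtain ⟨m', hm', rfl⟩ := h
      have := ih _ _ hm'
      simp only [List.length_cons]; omega

lemma depthRun_pos (l : List Char) : ∀ d d', 1 ≤ d → depthRun l d = some d' → 1 ≤ d' := by
  induction l with
  | nil => intro d d' hd h; simp [depthRun] at h; omega
  | cons c l ih =>
    intro d d' hd h
    by_cases hc : fcStep c d = 0
    · simp [depthRun, hc] at h
    · simp only [depthRun, if_neg hc] at h
      exact ih _ _ (by omega) h

lemma fc_take_of_lt (l : List Char) : ∀ (d k m : Nat), firstClose l d = some m → m < k →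
    firstClose (l.take k) d = some m := by
  induction l with
  | nil => intro d k m h _; simp [firstClose] at h
  | cons c l ih =>
    intro d k m h hm
    cases k with
    | zero => omega
    | succ k' =>
      by_cases hc : fcStep c d = 0
      · simp [firstClose, hc] at h ⊢; omega
      · simp only [firstClose, if_neg hc, Option.map_eq_some_iff] at h
        obtain ⟨m', hm', rfl⟩ := h
        simp only [List.take_succ_cons, firstClose, if_neg hc,
          ih (fcStep c d) k' m' hm' (by omega), Option.map_some]

lemma fc_mono (l : List Char) : ∀ a b m, 1 ≤ a → a ≤ b → firstClose l b = some m →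
    ∃ m', m' ≤ m ∧ firstClose l a = some m' := by
  induction l with
  | nil => intro a b m _ _ h; simp [firstClose] at h
  | cons c l ih =>
    intro a b m ha hab h
    by_cases hca : fcStep c a = 0
    · exact ⟨0, by omega, by simp [firstClose, hca]⟩
    · have hmono : fcStep c a ≤ fcStep c b := by unfold fcStep; split_ifs <;> omega
      have hcb : fcStep c b ≠ 0 := by omega
      simp only [firstClose, if_neg hcb, Option.map_eq_some_iff] at h
      obtain ⟨m0, hm0, rfl⟩ := h
      obtain ⟨m', hm', hfc⟩ := ih (fcStep c a) (fcStep c b) m0 (by omega) hmono hm0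
      exact ⟨m' + 1, by omega, by simp [firstClose, if_neg hca, hfc]⟩

-- ---- characterization of A's find_end_of_subtree ----

lemma findEndLoop_eq : ∀ (fuel : Nat) (s : List Char) (p d : Nat), 1 ≤ d → s.length ≤ p + fuel →
    findEndLoop s (p : Int) (d : Int) fuel =
      match firstClose (s.drop (p + 1)) d with
      | some m => ((p + 1 + m : Nat) : Int)
      | none => -1 := by
  intro fuel
  induction fuel with
  | zero =>
    intro s p d hd hlen
    have : s.drop (p + 1) = [] := List.drop_eq_nil_of_le (by omega)
    simp [findEndLoop, this, firstClose]
  | succ fuel ih =>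
    intro s p d hd hlen
    show findEndLoop s (p : Int) (d : Int) (fuel + 1) = _
    rw [findEndLoop]
    by_cases hend : p + 1 ≥ s.length
    · have hnil : s.drop (p + 1) = [] := List.drop_eq_nil_of_le (by omega)
      have : ((p : Int) + 1 ≥ (s.length : Int)) = True := by simp; omega
      simp [this, hnil, firstClose]
    · push_neg at hend
      have hcast : (p : Int) + 1 = ((p + 1 : Nat) : Int) := by push_cast; ring
      have hget : PySem.List.pyGet? s ((p : Int) + 1) = some s[p + 1] := by
        rw [hcast, PySem.List.pyGet?_natCast, List.getElem?_eq_getElem hend]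
      have hlt : ¬ ((p : Int) + 1 ≥ (s.length : Int)) := by omega
      rw [if_neg hlt]
      have hdropc : s.drop (p + 1) = s[p + 1] :: s.drop (p + 2) := by
        rw [List.drop_eq_getElem_cons hend]
      set c := s[p + 1] with hcdef
      have hsum : (if PySem.List.pyGet? s ((p:Int)+1) = some '(' then (d : Int) + 1
                   else if PySem.List.pyGet? s ((p:Int)+1) = some ')' then (d : Int) - 1 else (d : Int))
          = ((fcStep c d : Nat) : Int) := by
        rw [hget]
        by_cases h1 : c = '('
        · rw [if_pos (by rw [h1])]
          unfold fcStep
          rw [if_pos h1]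
          push_cast; ring
        · rw [if_neg (by simpa using h1)]
          by_cases h2 : c = ')'
          · rw [if_pos (by rw [h2])]
            unfold fcStep
            rw [if_neg h1, if_pos h2]
            omega
          · rw [if_neg (by simpa using h2)]
            unfold fcStep
            rw [if_neg h1, if_neg h2]
      rw [hsum]
      by_cases hz : fcStep c d = 0
      · rw [if_pos (by exact_mod_cast hz)]
        have hfc0 : firstClose (s.drop (p + 1)) d = some 0 := by
          rw [hdropc]; unfold firstClose; rw [if_pos hz]
        rw [hfc0]
        push_cast; ring
      · rw [if_neg (by exact_mod_cast hz)]
        rw [hcast, ih s (p + 1) (fcStep c d) (by omega) (by omega)]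
        rw [hdropc]
        simp only [firstClose, if_neg hz]
        cases hfc : firstClose (s.drop (p + 2)) (fcStep c d) with
        | none => simp
        | some m =>
          simp only [Option.map_some]
          congr 1
          omega

lemma findEnd_open (s : List Char) (p : Nat) (_hp : p < s.length) (hc : s[p]? = some '(') :
    findEnd s (p : Int) =
      match firstClose (s.drop (p + 1)) 1 with
      | some m => ((p + 1 + m : Nat) : Int)
      | none => -1 := by
  unfold findEnd
  rw [PySem.List.pyGet?_natCast, hc]
  rw [if_neg (by simp)]
  exact findEndLoop_eq s.length s p 1 (by omega) (by omega)

lemma findEnd_other (s : List Char) (p : Nat) (c : Char) (hc : s[p]? = some c) (hne : c ≠ '(') :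
    findEnd s (p : Int) = (p : Int) := by
  unfold findEnd
  rw [PySem.List.pyGet?_natCast, hc]
  rw [if_pos (by simp [hne])]

-- ---- characterization of B's precomputed end table ----

def endSpecAt (cs : List Char) (k i : Nat) : Int :=
  if cs[i]? = some '(' then
    match firstClose ((cs.drop (i + 1)).take (k - i - 1)) 1 with
    | some m => (i : Int) + 2 + (m : Int)
    | none => (i : Int) + 1
  else (i : Int) + 1

lemma depthRun_singleton (c : Char) (d : Nat) :
    depthRun [c] d = if fcStep c d = 0 then none else some (fcStep c d) := by
  by_cases h : fcStep c d = 0 <;> simp [depthRun, h]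

lemma firstClose_singleton (c : Char) (d : Nat) :
    firstClose [c] d = if fcStep c d = 0 then some 0 else none := by
  by_cases h : fcStep c d = 0 <;> simp [firstClose, h]

lemma fc_append_some (l m' : List Char) (d j : Nat) (h : firstClose l d = some j) :
    firstClose (l ++ m') d = some j := by
  rw [fc_append, h]

lemma fc_append_singleton_of_none (l : List Char) (c : Char) (d d' : Nat)
    (hfc : firstClose l d = none) (hdr : depthRun l d = some d') :
    firstClose (l ++ [c]) d = if fcStep c d' = 0 then some l.length else none := by
  rw [fc_append, hfc, hdr]
  dsimp only
  rw [firstClose_singleton]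
  by_cases h : fcStep c d' = 0 <;> simp [h]

lemma depthRun_append_singleton (l : List Char) (c : Char) (d d' : Nat)
    (hdr : depthRun l d = some d') :
    depthRun (l ++ [c]) d = if fcStep c d' = 0 then none else some (fcStep c d') := by
  rw [depthRun_append, hdr, Option.bind_some, depthRun_singleton]

lemma endSpecAt_of_le (cs : List Char) (k i : Nat) (h : k ≤ i + 1) :
    endSpecAt cs k i = (i : Int) + 1 := by
  unfold endSpecAt
  have h0 : k - i - 1 = 0 := by omega
  rw [h0]
  by_cases hc : cs[i]? = some '(' <;> simp [hc, firstClose]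

-- the invariant of B's single stack pass, after k characters have been processed
def InvBE (cs : List Char) (k : Nat) (e : List Int) (st : List Int) : Prop :=
  e.length = cs.length ∧
  (∀ (r : Nat) (x : Int), st[r]? = some x → ∃ iN : Nat, x = (iN : Int) ∧ iN < k ∧ cs[iN]? = some '(' ∧
      depthRun ((cs.drop (iN + 1)).take (k - iN - 1)) 1 = some (r + 1)) ∧
  (∀ i < cs.length, e[i]? = some (endSpecAt cs k i)) ∧
  (∀ i < k, cs[i]? = some '(' →
      (∃ r : Nat, st[r]? = some (i : Int)) ∨
      (firstClose ((cs.drop (i + 1)).take (k - i - 1)) 1).isSome = true)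

lemma seg_grow (cs : List Char) (k i : Nat) (hik : i < k) (hk : k < cs.length) :
    (cs.drop (i + 1)).take ((k + 1) - i - 1) = (cs.drop (i + 1)).take (k - i - 1) ++ [cs[k]] := by
  have h1 : (k + 1) - i - 1 = (k - i - 1) + 1 := by omega
  rw [h1, List.take_succ]
  have h2 : (cs.drop (i + 1))[k - i - 1]? = some cs[k] := by
    rw [List.getElem?_drop]
    have : i + 1 + (k - i - 1) = k := by omega
    rw [this, List.getElem?_eq_getElem hk]
  rw [h2]
  rfl

lemma invBE_step (cs : List Char) (k : Nat) (e st : List Int)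
    (hinv : InvBE cs k e st) (hk : k < cs.length) :
    InvBE cs (k + 1) (buildEndStep (e, st) ((k : Int), cs[k])).1
      (buildEndStep (e, st) ((k : Int), cs[k])).2 := by
  obtain ⟨hlen, hst, he, hcomp⟩ := hinv
  have hck : cs[k]? = some cs[k] := List.getElem?_eq_getElem hk
  set c := cs[k] with hc
  by_cases hop : c = '('
  · -- push
    have hstep : buildEndStep (e, st) ((k : Int), c) = (e, (k : Int) :: st) := by
      simp [buildEndStep, hop]
    rw [hstep]
    refine ⟨hlen, ?_, ?_, ?_⟩
    · intro r x hx
      cases r with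
      | zero =>
        simp at hx
        refine ⟨k, hx.symm, by omega, by rw [← hop]; exact hck, ?_⟩
        have : (k + 1) - k - 1 = 0 := by omega
        rw [this]
        simp [depthRun]
      | succ r' =>
        simp only [List.getElem?_cons_succ] at hx
        obtain ⟨iN, rfl, hik, hio, hdr⟩ := hst r' x hx
        refine ⟨iN, rfl, by omega, hio, ?_⟩
        rw [seg_grow cs k iN hik hk, depthRun_append_singleton _ _ _ _ hdr, ← hc, hop]
        have : fcStep '(' (r' + 1) = r' + 2 := by simp [fcStep]
        rw [this]
        simp
    · intro i hi
      rcases Nat.lt_or_ge i k with hik | hik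
      · rw [he i hi]
        congr 1
        unfold endSpecAt
        by_cases hio : cs[i]? = some '('
        · rw [if_pos hio, if_pos hio]
          rw [seg_grow cs k i hik hk]
          cases hfc : firstClose ((cs.drop (i + 1)).take (k - i - 1)) 1 with
          | some m => rw [fc_append_some _ _ _ _ hfc]
          | none =>
            have hdr := (fc_none_iff _ _).1 hfc
            rw [Option.isSome_iff_exists] at hdr
            obtain ⟨d', hdr⟩ := hdr
            rw [fc_append_singleton_of_none _ _ _ _ hfc hdr, ← hc, hop]
            have : fcStep '(' d' = d' + 1 := by simp [fcStep]
            rw [this, if_neg (by omega)]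
        · rw [if_neg hio, if_neg hio]
      · rw [he i hi, endSpecAt_of_le cs k i (by omega), endSpecAt_of_le cs (k + 1) i (by omega)]
    · intro i hi hio
      rcases Nat.lt_or_ge i k with hik | hik
      · rcases hcomp i hik hio with ⟨r, hr⟩ | hsome
        · exact Or.inl ⟨r + 1, by simpa using hr⟩
        · refine Or.inr ?_
          rw [Option.isSome_iff_exists] at hsome
          obtain ⟨m, hm⟩ := hsome
          rw [seg_grow cs k i hik hk, fc_append_some _ _ _ _ hm]
          simp
      · have : i = k := by omega
        subst this
        exact Or.inl ⟨0, by simp⟩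
  · by_cases hcl : c = ')'
    · cases hstc : st with
      | nil =>
        -- ')' with empty stack: nothing happens
        subst hstc
        have hstep : buildEndStep (e, ([] : List Int)) ((k : Int), c) = (e, []) := by
          simp [buildEndStep, hcl]
        rw [hstep]
        refine ⟨hlen, by intro r x hx; simp at hx, ?_, ?_⟩
        · intro i hi
          rcases Nat.lt_or_ge i k with hik | hik
          · rw [he i hi]
            congr 1
            unfold endSpecAt
            by_cases hio : cs[i]? = some '('
            · rw [if_pos hio, if_pos hio]
              rcases hcomp i hik hio with ⟨r, hr⟩ | hsome
              · simp at hr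
              · rw [Option.isSome_iff_exists] at hsome
                obtain ⟨m, hm⟩ := hsome
                rw [seg_grow cs k i hik hk, fc_append_some _ _ _ _ hm, hm]
            · rw [if_neg hio, if_neg hio]
          · rw [he i hi, endSpecAt_of_le cs k i (by omega), endSpecAt_of_le cs (k + 1) i (by omega)]
        · intro i hi hio
          rcases Nat.lt_or_ge i k with hik | hik
          · rcases hcomp i hik hio with ⟨r, hr⟩ | hsome
            · simp at hr
            · refine Or.inr ?_
              rw [Option.isSome_iff_exists] at hsome
              obtain ⟨m, hm⟩ := hsome
              rw [seg_grow cs k i hik hk, fc_append_some _ _ _ _ hm]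
              simp
          · have : i = k := by omega
            subst this
            rw [hck] at hio
            simp [hcl] at hio
      | cons x rest =>
        -- pop: e[x] := k + 1
        subst hstc
        obtain ⟨i0, rfl, hi0k, hi0o, hdr0⟩ := hst 0 x rfl
        have hstep : buildEndStep (e, (i0 : Int) :: rest) ((k : Int), c) =
            (e.set i0 ((k : Int) + 1), rest) := by
          simp [buildEndStep, hcl, PySem.List.pySetD_natCast]
        rw [hstep]
        have hdr0' : depthRun ((cs.drop (i0 + 1)).take (k - i0 - 1)) 1 = some 1 := hdr0
        have hfc0 : firstClose ((cs.drop (i0 + 1)).take (k - i0 - 1)) 1 = none := by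
          cases hfc : firstClose ((cs.drop (i0 + 1)).take (k - i0 - 1)) 1 with
          | none => rfl
          | some m =>
            have := (fc_none_iff ((cs.drop (i0 + 1)).take (k - i0 - 1)) 1)
            rw [hfc, hdr0'] at this
            simpa using this.2 rfl
        have hfc0' : firstClose ((cs.drop (i0 + 1)).take ((k + 1) - i0 - 1)) 1
            = some (k - i0 - 1) := by
          rw [seg_grow cs k i0 hi0k hk, fc_append_singleton_of_none _ _ _ _ hfc0 hdr0',
            ← hc, hcl]
          have : fcStep ')' 1 = 0 := by simp [fcStep]
          rw [this, if_pos rfl]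
          congr 1
          rw [List.length_take, List.length_drop]
          omega
        refine ⟨by simpa using hlen, ?_, ?_, ?_⟩
        · intro r x hx
          have hx' : ((i0 : Int) :: rest)[r + 1]? = some x := by simpa using hx
          obtain ⟨iN, rfl, hik, hio, hdr⟩ := hst (r + 1) x hx'
          refine ⟨iN, rfl, by omega, hio, ?_⟩
          rw [seg_grow cs k iN hik hk, depthRun_append_singleton _ _ _ _ hdr, ← hc, hcl]
          have : fcStep ')' (r + 2) = r + 1 := by simp [fcStep]
          rw [this, if_neg (by omega)]
        · intro i hi
          rcases Nat.decEq i i0 with hne | heq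
          · rw [List.getElem?_set_ne (by omega), he i hi]
            congr 1
            unfold endSpecAt
            by_cases hio : cs[i]? = some '('
            · rw [if_pos hio, if_pos hio]
              rcases Nat.lt_or_ge i k with hik | hik
              · cases hfc : firstClose ((cs.drop (i + 1)).take (k - i - 1)) 1 with
                | some m => rw [seg_grow cs k i hik hk, fc_append_some _ _ _ _ hfc]
                | none =>
                  rcases hcomp i hik hio with ⟨r, hr⟩ | hsome
                  · -- i is on the stack at some position r; r ≠ 0 since i ≠ i0
                    have hrne : r ≠ 0 := by
                      intro h0
                      subst h0
                      simp at hr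
                      exact hne (by exact_mod_cast hr.symm)
                    obtain ⟨r', rfl⟩ := Nat.exists_eq_succ_of_ne_zero hrne
                    obtain ⟨iN, hiN, _, _, hdr⟩ := hst (r' + 1) _ hr
                    have hiNi : iN = i := by exact_mod_cast hiN.symm
                    subst hiNi
                    rw [seg_grow cs k iN hik hk,
                      fc_append_singleton_of_none _ _ _ _ hfc hdr, ← hc, hcl]
                    have : fcStep ')' (r' + 2) = r' + 1 := by simp [fcStep]
                    rw [this, if_neg (by omega)]
                  · rw [Option.isSome_iff_exists] at hsome
                    obtain ⟨m, hm⟩ := hsome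
                    rw [hfc] at hm
                    cases hm
              · have h1 : k - i - 1 = 0 := by omega
                have h2 : (k + 1) - i - 1 = 0 := by omega
                rw [h1, h2]
            · rw [if_neg hio, if_neg hio]
          · subst heq
            rw [List.getElem?_set_self (by omega)]
            congr 1
            unfold endSpecAt
            rw [if_pos hi0o, hfc0']
            push_cast
            omega
        · intro i hi hio
          rcases Nat.decEq i i0 with hne | heq
          · rcases Nat.lt_or_ge i k with hik | hik
            · rcases hcomp i hik hio with ⟨r, hr⟩ | hsome
              · have hrne : r ≠ 0 := by
                  intro h0
                  subst h0
                  simp at hr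
                  exact hne (by exact_mod_cast hr.symm)
                obtain ⟨r', rfl⟩ := Nat.exists_eq_succ_of_ne_zero hrne
                refine Or.inl ⟨r', ?_⟩
                simpa using hr
              · refine Or.inr ?_
                rw [Option.isSome_iff_exists] at hsome
                obtain ⟨m, hm⟩ := hsome
                rw [seg_grow cs k i hik hk, fc_append_some _ _ _ _ hm]
                simp
            · have : i = k := by omega
              subst this
              rw [hck] at hio
              simp [hcl] at hio
          · subst heq
            refine Or.inr ?_
            rw [hfc0']
            rfl
    · -- an ordinary character
      have hstep : buildEndStep (e, st) ((k : Int), c) = (e, st) := by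
        simp [buildEndStep, hop, hcl]
      rw [hstep]
      refine ⟨hlen, ?_, ?_, ?_⟩
      · intro r x hx
        obtain ⟨iN, rfl, hik, hio, hdr⟩ := hst r x hx
        refine ⟨iN, rfl, by omega, hio, ?_⟩
        rw [seg_grow cs k iN hik hk, depthRun_append_singleton _ _ _ _ hdr]
        have : fcStep c (r + 1) = r + 1 := by simp [fcStep, hop, hcl]
        rw [this, if_neg (by omega)]
      · intro i hi
        rcases Nat.lt_or_ge i k with hik | hik
        · rw [he i hi]
          congr 1
          unfold endSpecAt
          by_cases hio : cs[i]? = some '('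
          · rw [if_pos hio, if_pos hio]
            cases hfc : firstClose ((cs.drop (i + 1)).take (k - i - 1)) 1 with
            | some m => rw [seg_grow cs k i hik hk, fc_append_some _ _ _ _ hfc]
            | none =>
              have hdr := (fc_none_iff _ _).1 hfc
              rw [Option.isSome_iff_exists] at hdr
              obtain ⟨d', hdr⟩ := hdr
              have hd' : 1 ≤ d' := depthRun_pos _ _ _ (by omega) hdr
              rw [seg_grow cs k i hik hk,
                fc_append_singleton_of_none _ _ _ _ hfc hdr]
              have : fcStep c d' = d' := by simp [fcStep, hop, hcl]
              rw [this, if_neg (by omega)]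
          · rw [if_neg hio, if_neg hio]
        · rw [he i hi, endSpecAt_of_le cs k i (by omega), endSpecAt_of_le cs (k + 1) i (by omega)]
      · intro i hi hio
        rcases Nat.lt_or_ge i k with hik | hik
        · rcases hcomp i hik hio with ⟨r, hr⟩ | hsome
          · exact Or.inl ⟨r, hr⟩
          · refine Or.inr ?_
            rw [Option.isSome_iff_exists] at hsome
            obtain ⟨m, hm⟩ := hsome
            rw [seg_grow cs k i hik hk, fc_append_some _ _ _ _ hm]
            simp
        · have : i = k := by omega
          subst this
          rw [hck] at hio
          have : c = '(' := by simpa using hio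
          exact absurd this hop

lemma invBE_init (cs : List Char) : InvBE cs 0 (buildEndInit cs.length) [] := by
  refine ⟨?_, by intro r x hx; simp at hx, ?_, by intro i hi; omega⟩
  · unfold buildEndInit
    rw [PySem.List.length_pyRange_one]
    omega
  · intro i hi
    unfold buildEndInit
    rw [PySem.List.pyRange_one]
    rw [List.getElem?_map]
    have h1 : ((cs.length : Int) + 1 - 1).toNat = cs.length := by omega
    rw [h1, List.getElem?_range hi]
    rw [endSpecAt_of_le cs 0 i (by omega)]
    simp
    ring

lemma buildEnd_inv (cs : List Char) : ∀ k, k ≤ cs.length →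
    InvBE cs k ((PySem.List.enumerate (cs.take k) 0).foldl buildEndStep (buildEndInit cs.length, [])).1
      ((PySem.List.enumerate (cs.take k) 0).foldl buildEndStep (buildEndInit cs.length, [])).2 := by
  intro k
  induction k with
  | zero =>
    intro _
    rw [List.take_zero, PySem.List.enumerate_nil]
    exact invBE_init cs
  | succ k ih =>
    intro hk1
    have hk : k < cs.length := by omega
    have htake : cs.take (k + 1) = cs.take k ++ [cs[k]] := by
      rw [List.take_succ, List.getElem?_eq_getElem hk]
      rfl
    have hlenk : (cs.take k).length = k := List.length_take_of_le (by omega)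
    rw [htake, PySem.List.enumerate_append, List.foldl_append, hlenk]
    have hone : PySem.List.enumerate [cs[k]] (0 + (k : Int)) = [((k : Int), cs[k])] := by
      rw [PySem.List.enumerate_cons, PySem.List.enumerate_nil]
      norm_num
    rw [hone]
    simp only [List.foldl_cons, List.foldl_nil]
    exact invBE_step cs k _ _ (ih (by omega)) hk

lemma buildEnd_spec (cs : List Char) :
    (buildEnd cs).length = cs.length ∧
    ∀ i < cs.length, (buildEnd cs)[i]? = some (endSpecAt cs cs.length i) := by
  have h := buildEnd_inv cs cs.length (le_refl _)
  rw [List.take_length] at h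
  exact ⟨h.1, h.2.2.1⟩

-- ---- the glue: A's sliced recursion = B's index-based descent ----

def TopOK (cs : List Char) : Prop :=
  ∀ i, 2 ≤ i → i + 1 < cs.length → cs[i]? = some '(' →
    ∃ m, firstClose (cs.drop (i + 1)) 1 = some m

def ChildSpan (cs : List Char) (lo hi : Nat) : Prop :=
  cs[lo]? = some '(' ∧ firstClose (cs.drop (lo + 1)) 1 = some (hi - lo - 2) ∧ 2 ≤ hi - lo

def MainStmt (cs : List Char) (e : List Int) (max_size : Int) (L : Nat) : Prop :=
  ∀ lo hi, lo ≤ hi → hi ≤ cs.length → hi - lo = L →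
    (hi - lo ≤ 1 ∨ (lo = 0 ∧ hi = cs.length ∧ TopOK cs) ∨ ChildSpan cs lo hi) →
    ∀ dep, L < dep →
      splitA_core max_size dep (PySem.List.slice cs (some (lo : Int)) (some (hi : Int))) =
        emitB cs e max_size dep (lo : Int) (hi : Int)

-- unfolding equations for the fueled ports
lemma splitA_zero (max_size : Int) (s : List Char) : splitA_core max_size 0 s = [] := by
  rw [splitA_core]

lemma splitA_succ (max_size : Int) (d : Nat) (s : List Char) :
    splitA_core max_size (d + 1) s =
      if (s.length : Int) ≤ 1 then []
      else if (s.length : Int) ≤ max_size then [String.ofList s]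
      else loopA max_size d s 2 s.length := by
  rw [splitA_core]

lemma loopA_succ (max_size : Int) (d : Nat) (s : List Char) (pos : Int) (lf : Nat) :
    loopA max_size d s pos (lf + 1) =
      if pos + 1 < (s.length : Int) then
        splitA_core max_size d (PySem.List.slice s (some pos) (some (findEnd s pos + 1))) ++
          loopA max_size d s (findEnd s pos + 1) lf
      else [] := by
  rw [loopA]

lemma emitB_succ (sen : List Char) (e : List Int) (max_size : Int) (d : Nat) (lo hi : Int) :
    emitB sen e max_size (d + 1) lo hi =
      if hi - lo ≤ 1 then []
      else if hi - lo ≤ max_size then [String.ofList (PySem.List.slice sen (some lo) (some hi))]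
      else loopB sen e max_size d (lo + 2) hi sen.length := by
  rw [emitB]

lemma loopB_succ (sen : List Char) (e : List Int) (max_size : Int) (d : Nat) (pos hi : Int) (lf : Nat) :
    loopB sen e max_size d pos hi (lf + 1) =
      if pos + 1 < hi then
        emitB sen e max_size d pos (PySem.List.pyGetD e pos (pos + 1)) ++
          loopB sen e max_size d (PySem.List.pyGetD e pos (pos + 1)) hi lf
      else [] := by
  rw [loopB]

lemma splitA_small (max_size : Int) (dep : Nat) (s : List Char) (h : s.length ≤ 1) :
    splitA_core max_size dep s = [] := by
  cases dep with
  | zero => exact splitA_zero max_size s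
  | succ d =>
    rw [splitA_succ, if_pos (by exact_mod_cast h)]

lemma emitB_small (sen : List Char) (e : List Int) (max_size : Int) (dep : Nat) (lo hi : Int)
    (h : hi - lo ≤ 1) : emitB sen e max_size dep lo hi = [] := by
  cases dep with
  | zero => rw [emitB]
  | succ d => rw [emitB_succ, if_pos h]

-- indexing helpers for the A-side slice
lemma getElem?_drop_take (cs : List Char) (lo hi j : Nat) (hj : j < hi - lo) :
    ((cs.drop lo).take (hi - lo))[j]? = cs[lo + j]? := by
  rw [List.getElem?_take_of_lt hj, List.getElem?_drop]

lemma drop_drop_take (cs : List Char) (lo hi q : Nat) :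
    ((cs.drop lo).take (hi - lo)).drop q = (cs.drop (lo + q)).take (hi - lo - q) := by
  rw [List.drop_take, List.drop_drop]

-- B's table lookup, rewritten through the characterization
lemma lookup_end (cs : List Char) (e : List Int)
    (hE : ∀ i < cs.length, e[i]? = some (endSpecAt cs cs.length i))
    (pos : Nat) (hpos : pos < cs.length) :
    PySem.List.pyGetD e (pos : Int) ((pos : Int) + 1) = endSpecAt cs cs.length pos := by
  rw [PySem.List.pyGetD_natCast, List.getD_eq_getElem?_getD, hE pos hpos]
  rfl

lemma endSpec_full (cs : List Char) (pos : Nat) (hpos : pos < cs.length) :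
    endSpecAt cs cs.length pos =
      if cs[pos]? = some '(' then
        match firstClose (cs.drop (pos + 1)) 1 with
        | some m => (pos : Int) + 2 + (m : Int)
        | none => (pos : Int) + 1
      else (pos : Int) + 1 := by
  unfold endSpecAt
  have : (cs.drop (pos + 1)).take (cs.length - pos - 1) = cs.drop (pos + 1) := by
    apply List.take_of_length_le
    rw [List.length_drop]
    omega
  rw [this]

-- the loop correspondence: A's while loop on the slice = B's while loop on indices
theorem loop_glue (cs : List Char) (e : List Int) (max_size : Int)
    (hE : ∀ i < cs.length, e[i]? = some (endSpecAt cs cs.length i))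
    (lo hi : Nat) (hlo2 : lo + 2 ≤ hi) (hhi : hi ≤ cs.length)
    (hcase : (lo = 0 ∧ hi = cs.length ∧ TopOK cs) ∨ ChildSpan cs lo hi)
    (d : Nat) (hd : hi - lo ≤ d)
    (hIH : ∀ L', L' < hi - lo → MainStmt cs e max_size L')
    (pos : Nat) (_hpos : lo + 2 ≤ pos) (hple : pos ≤ hi)
    (lfA lfB : Nat) (hlfA : hi - pos < lfA) (hlfB : hi - pos < lfB) :
    loopA max_size d ((cs.drop lo).take (hi - lo)) (((pos - lo : Nat) : Int)) lfA =
      loopB cs e max_size d (pos : Int) (hi : Int) lfB := by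
  obtain ⟨a, rfl⟩ : ∃ a, lfA = a + 1 := ⟨lfA - 1, by omega⟩
  obtain ⟨b, rfl⟩ : ∃ b, lfB = b + 1 := ⟨lfB - 1, by omega⟩
  rw [loopA_succ, loopB_succ]
  have htlen : ((cs.drop lo).take (hi - lo)).length = hi - lo := by
    rw [List.length_take, List.length_drop]
    omega
  by_cases hcnt : pos + 1 < hi
  · have hposn : pos < cs.length := by omega
    have hcondA : (((pos - lo : Nat) : Int) + 1 < (((cs.drop lo).take (hi - lo)).length : Int)) := by
      rw [htlen]
      have h1 : ((pos - lo : Nat) : Int) = (pos : Int) - (lo : Int) := by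
        push_cast [Nat.cast_sub (by omega : lo ≤ pos)]; ring
      have h2 : ((hi - lo : Nat) : Int) = (hi : Int) - (lo : Int) := by
        push_cast [Nat.cast_sub (by omega : lo ≤ hi)]; ring
      rw [h1, h2]
      omega
    have hcondB : ((pos : Int) + 1 < (hi : Int)) := by omega
    rw [if_pos hcondA, if_pos hcondB]
    have hcget : cs[pos]? = some cs[pos] := List.getElem?_eq_getElem hposn
    set c := cs[pos] with hcdef
    have htget : ((cs.drop lo).take (hi - lo))[pos - lo]? = some c := by
      rw [getElem?_drop_take cs lo hi (pos - lo) (by omega)]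
      have h3 : lo + (pos - lo) = pos := by omega
      rw [h3, hcget]
    by_cases copen : c = '('
    · -- a parenthesised subtree child [pos, pos+2+m)
      have hm : ∃ m, firstClose (cs.drop (pos + 1)) 1 = some m ∧ m < hi - pos - 1 := by
        rcases hcase with ⟨hlo0, hhin, htop⟩ | ⟨hopen, hfcspan, h2le⟩
        · obtain ⟨m, hm⟩ := htop pos (by omega) (by omega) (by rw [hcget, copen])
          have hlt := fc_lt_length _ _ _ hm
          rw [List.length_drop] at hlt
          exact ⟨m, hm, by omega⟩
        · have h1 : (cs.drop (lo + 1)).drop (pos - lo - 1) = cs.drop pos := by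
            rw [List.drop_drop]
            congr 1
            omega
          have hsplit : cs.drop (lo + 1) =
              (cs.drop (lo + 1)).take (pos - lo - 1) ++ cs.drop pos := by
            rw [← h1, List.take_append_drop]
          have happ := fc_append ((cs.drop (lo + 1)).take (pos - lo - 1)) (cs.drop pos) 1
          rw [← hsplit, hfcspan] at happ
          have hPlen : ((cs.drop (lo + 1)).take (pos - lo - 1)).length = pos - lo - 1 := by
            rw [List.length_take, List.length_drop]
            omega
          cases hfcP : firstClose ((cs.drop (lo + 1)).take (pos - lo - 1)) 1 with
          | some j =>
            rw [hfcP] at happ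
            simp only [Option.some.injEq] at happ
            have hlt := fc_lt_length _ _ _ hfcP
            rw [hPlen] at hlt
            omega
          | none =>
            rw [hfcP] at happ
            cases hdrP : depthRun ((cs.drop (lo + 1)).take (pos - lo - 1)) 1 with
            | none => rw [hdrP] at happ; simp at happ
            | some d' =>
              rw [hdrP] at happ
              simp only at happ
              obtain ⟨m0, hm0, hm0e⟩ := Option.map_eq_some_iff.1 happ.symm
              rw [hPlen] at hm0e
              have hd' : 1 ≤ d' := depthRun_pos _ _ _ (by omega) hdrP
              have hdropc : cs.drop pos = c :: cs.drop (pos + 1) :=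
                List.drop_eq_getElem_cons hposn
              rw [hdropc] at hm0
              have hstep : fcStep c d' = d' + 1 := by simp [fcStep, copen]
              have hunf : firstClose (c :: cs.drop (pos + 1)) d' =
                  (firstClose (cs.drop (pos + 1)) (d' + 1)).map (· + 1) := by
                rw [firstClose_cons, hstep, if_neg (by omega)]
              rw [hunf] at hm0
              obtain ⟨m1, hm1, hm1e⟩ := Option.map_eq_some_iff.1 hm0
              obtain ⟨m, hmle, hmfc⟩ := fc_mono (cs.drop (pos + 1)) 1 (d' + 1) m1
                (le_refl 1) (by omega) hm1
              exact ⟨m, hmfc, by omega⟩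
      obtain ⟨m, hm, hmlt⟩ := hm
      -- A side: find_end on the slice returns the local index of the child's end
      have htget' : ((cs.drop lo).take (hi - lo))[pos - lo]? = some '(' := by
        rw [htget, copen]
      have htdrop : ((cs.drop lo).take (hi - lo)).drop ((pos - lo) + 1) =
          (cs.drop (pos + 1)).take (hi - pos - 1) := by
        have e1 : lo + (pos - lo + 1) = pos + 1 := by omega
        have e2 : hi - lo - (pos - lo + 1) = hi - pos - 1 := by omega
        rw [drop_drop_take, e1, e2]
      have hfe := findEnd_open ((cs.drop lo).take (hi - lo)) (pos - lo) (by omega) htget'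
      rw [htdrop, fc_take_of_lt _ _ _ _ hm hmlt] at hfe
      rw [hfe]
      have hnposA : ((pos - lo + 1 + m : Nat) : Int) + 1 = (((pos - lo) + 2 + m : Nat) : Int) := by
        push_cast; ring
      rw [hnposA]
      -- A's child slice, in drop/take form
      have hsliceA : PySem.List.slice ((cs.drop lo).take (hi - lo))
          (some ((pos - lo : Nat) : Int)) (some (((pos - lo) + 2 + m : Nat) : Int)) =
          (cs.drop pos).take (m + 2) := by
        rw [PySem.List.slice_natCast]
        have e3 : (pos - lo) + 2 + m - (pos - lo) = m + 2 := by omega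
        have e4 : lo + (pos - lo) = pos := by omega
        have e5 : hi - lo - (pos - lo) = hi - pos := by omega
        rw [e3, drop_drop_take, e4, e5, List.take_take]
        congr 1
        omega
      -- B side: the table lookup gives the same end index
      have hlook : PySem.List.pyGetD e (pos : Int) ((pos : Int) + 1) = ((pos + 2 + m : Nat) : Int) := by
        rw [lookup_end cs e hE pos hposn, endSpec_full cs pos hposn,
          if_pos (by rw [hcget, copen]), hm]
        push_cast; ring
      rw [hlook]
      -- the child: A's recursion on the slice = B's recursion on indices
      have e6 : pos + 2 + m - pos - 2 = m := by omega
      have hchild := hIH (m + 2) (by omega) pos (pos + 2 + m) (by omega) (by omega) (by omega)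
        (Or.inr (Or.inr ⟨by rw [hcget, copen], by rw [e6]; exact hm, by omega⟩)) d (by omega)
      rw [PySem.List.slice_natCast] at hchild
      have e7 : pos + 2 + m - pos = m + 2 := by omega
      rw [e7] at hchild
      rw [hsliceA, hchild]
      -- the tail of the loop
      have htail := loop_glue cs e max_size hE lo hi hlo2 hhi hcase d hd hIH
        (pos + 2 + m) (by omega) (by omega) a b (by omega) (by omega)
      have e8 : pos + 2 + m - lo = (pos - lo) + 2 + m := by omega
      rw [e8] at htail
      rw [htail]
    · -- a single non-"(" character: both sides step by one position
      have hfe : findEnd ((cs.drop lo).take (hi - lo)) ((pos - lo : Nat) : Int) =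
          ((pos - lo : Nat) : Int) :=
        findEnd_other _ _ _ htget copen
      rw [hfe]
      have hc1 : ((pos - lo : Nat) : Int) + 1 = (((pos - lo) + 1 : Nat) : Int) := by
        push_cast; ring
      rw [hc1]
      have hheadA : splitA_core max_size d
          (PySem.List.slice ((cs.drop lo).take (hi - lo)) (some ((pos - lo : Nat) : Int))
            (some (((pos - lo) + 1 : Nat) : Int))) = [] := by
        apply splitA_small
        rw [PySem.List.slice_natCast]
        rw [List.length_take]
        omega
      have hlook : PySem.List.pyGetD e (pos : Int) ((pos : Int) + 1) = (pos : Int) + 1 := by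
        rw [lookup_end cs e hE pos hposn, endSpec_full cs pos hposn,
          if_neg (by rw [hcget]; simpa using copen)]
      rw [hlook]
      have hheadB : emitB cs e max_size d (pos : Int) ((pos : Int) + 1) = [] :=
        emitB_small _ _ _ _ _ _ (by omega)
      rw [hheadA, hheadB]
      have htail := loop_glue cs e max_size hE lo hi hlo2 hhi hcase d hd hIH
        (pos + 1) (by omega) (by omega) a b (by omega) (by omega)
      have e8 : pos + 1 - lo = (pos - lo) + 1 := by omega
      rw [e8] at htail
      have e9 : ((pos + 1 : Nat) : Int) = (pos : Int) + 1 := by push_cast; ring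
      rw [e9] at htail
      rw [htail]
  · have hcondA : ¬ (((pos - lo : Nat) : Int) + 1 < (((cs.drop lo).take (hi - lo)).length : Int)) := by
      rw [htlen]
      have h1 : ((pos - lo : Nat) : Int) = (pos : Int) - (lo : Int) := by
        push_cast [Nat.cast_sub (by omega : lo ≤ pos)]; ring
      have h2 : ((hi - lo : Nat) : Int) = (hi : Int) - (lo : Int) := by
        push_cast [Nat.cast_sub (by omega : lo ≤ hi)]; ring
      rw [h1, h2]
      omega
    have hcondB : ¬ ((pos : Int) + 1 < (hi : Int)) := by omega
    rw [if_neg hcondA, if_neg hcondB]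
termination_by (hi - pos)

lemma main_glue (cs : List Char) (e : List Int) (max_size : Int)
    (hE : ∀ i < cs.length, e[i]? = some (endSpecAt cs cs.length i)) :
    ∀ L, MainStmt cs e max_size L := by
  intro L
  induction L using Nat.strong_induction_on with
  | _ L IH =>
    intro lo hi hlohi hhi hL hcase dep hdep
    obtain ⟨d, rfl⟩ : ∃ d, dep = d + 1 := ⟨dep - 1, by omega⟩
    rw [PySem.List.slice_natCast, splitA_succ, emitB_succ]
    have htlen : ((cs.drop lo).take (hi - lo)).length = hi - lo := by
      rw [List.length_take, List.length_drop]
      omega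
    have hcast : ((hi : Int) - (lo : Int)) = ((hi - lo : Nat) : Int) := by
      push_cast [Nat.cast_sub hlohi]; ring
    rw [htlen, hcast]
    by_cases h1 : ((hi - lo : Nat) : Int) ≤ 1
    · rw [if_pos h1, if_pos h1]
    · rw [if_neg h1, if_neg h1]
      by_cases h2 : ((hi - lo : Nat) : Int) ≤ max_size
      · rw [if_pos h2, if_pos h2, PySem.List.slice_natCast]
      · rw [if_neg h2, if_neg h2]
        have h2le : lo + 2 ≤ hi := by omega
        have hcase' : (lo = 0 ∧ hi = cs.length ∧ TopOK cs) ∨ ChildSpan cs lo hi := by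
          rcases hcase with hsm | h | h
          · omega
          · exact Or.inl h
          · exact Or.inr h
        have := loop_glue cs e max_size hE lo hi h2le hhi hcase' d (by omega)
          (fun L' hlt => IH L' (by omega)) (lo + 2) (le_refl _) (by omega)
          (hi - lo) cs.length (by omega) (by omega)
        have hc2 : (((lo + 2) - lo : Nat) : Int) = 2 := by
          have : (lo + 2) - lo = 2 := by omega
          rw [this]; rfl
        have hc3 : (((lo + 2) : Nat) : Int) = (lo : Int) + 2 := by push_cast; ring
        rw [hc2, hc3] at this
        exact this

-- ===== VERDICT (by name: the statement is the Claim_ definition above) =====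
lemma slice_full (cs : List Char) :
    PySem.List.slice cs (some (0 : Int)) (some ((cs.length : Nat) : Int)) = cs := by
  have h0 : (0 : Int) = ((0 : Nat) : Int) := rfl
  rw [h0, PySem.List.slice_natCast]
  simp

theorem split_into_subtrees_spec : Claim_equal_split_into_subtrees := by
  intro sentence max_size _ hpre
  unfold Spec_split_into_subtrees split_into_subtrees split_into_subtrees_alt
  set cs := sentence.toList with hcs
  unfold Pre_split_into_subtrees at hpre
  rw [← hcs] at hpre
  have hE := (buildEnd_spec cs).2
  by_cases h1 : cs.length ≤ 1
  · rw [splitA_small _ _ _ h1, emitB_small _ _ _ _ _ _ (by omega)]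
  · by_cases h2 : (cs.length : Int) ≤ max_size
    · rw [splitA_succ, if_neg (by omega), if_pos h2]
      rw [emitB_succ, if_neg (by omega), if_pos (by omega)]
      rw [slice_full]
    · have htop : TopOK cs := by
        rcases hpre with h | h | h
        · omega
        · exact absurd h h2
        · intro i h2i hi1 hio
          have := h i (by omega) h2i hio
          exact Option.isSome_iff_exists.1 this
      have hmain := main_glue cs (buildEnd cs) max_size hE cs.length 0 cs.length
        (by omega) (le_refl _) (by omega) (Or.inr (Or.inl ⟨rfl, rfl, htop⟩))
        (cs.length + 1) (by omega)
      rw [show ((0 : Nat) : Int) = (0 : Int) from rfl] at hmain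
      rw [slice_full] at hmain
      exact hmain
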